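-- pv_equiv track=rewrite | github.com/theOehrly/F1Telemetry | f1telemetry/postprocessing2.py | find_spikes
-- ===== SOURCE A (Python) =====
-- def find_spikes(data, pos_max=15, neg_max=-40):
--     # check for changes in the derived data which are bigger than pos_max/neg_max
--     # the segment which is considered a spike is the added to error_segs as [start, end] of spike
--     error_segs = list()
--     for i in range(len(data)):
--         if data[i] > pos_max or data[i] < neg_max:
--             i_start = i
--             data_tmp = 0
--             while data_tmp == 0:
--                 i += 1
--                 if i == len(data):
--                     break  # we've reached the end
--                 data_tmp = data[i]
--             i_end = i
--             error_segs.append([i_start, i_end])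
--
--     return error_segs
-- ===== SOURCE B (Python) =====
-- def find_spikes(data, pos_max=15, neg_max=-40):
--     # One backward pass precomputes, for each index i, the first index j > i
--     # with data[j] != 0 (or len(data)); then one forward comprehension emits
--     # a [start, end] segment for every spike index.
--     n = len(data)
--     nxt = [0] * n
--     nz = n
--     for i in range(n - 1, -1, -1):
--         nxt[i] = nz
--         if data[i] != 0:
--             nz = i
--     return [[i, nxt[i]] for i in range(n) if data[i] > pos_max or data[i] < neg_max]
-- ===== Notes on version B (the rewrite author's own statement) =====
-- stated objective: alternative
-- what changed: Replaces A's per-spike forward rescan for the next nonzero value with a single backward pass precomputing a next-nonzero-index array, then one forward pass emitting [i, nxt[i]] per spike index.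
import Mathlib
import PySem

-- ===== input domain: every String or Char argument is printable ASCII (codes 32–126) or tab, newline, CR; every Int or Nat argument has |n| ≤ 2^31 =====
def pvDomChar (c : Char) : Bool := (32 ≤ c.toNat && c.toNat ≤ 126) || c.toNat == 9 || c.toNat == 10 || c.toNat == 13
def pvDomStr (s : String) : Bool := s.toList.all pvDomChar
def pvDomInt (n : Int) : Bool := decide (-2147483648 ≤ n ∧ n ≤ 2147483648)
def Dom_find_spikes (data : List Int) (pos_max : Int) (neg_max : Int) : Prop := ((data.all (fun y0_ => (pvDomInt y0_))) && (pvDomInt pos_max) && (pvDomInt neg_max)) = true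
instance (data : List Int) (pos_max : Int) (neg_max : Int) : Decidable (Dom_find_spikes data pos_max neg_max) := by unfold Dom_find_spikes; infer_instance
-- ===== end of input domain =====

-- B replaces A's per-spike forward rescan by a single backward pass precomputing
-- the next-nonzero index for every position, looked up once per spike.

-- ===== PORT A =====
-- A's inner `while data_tmp == 0` loop: starting from index i, advance until a
-- nonzero element or the end of the list; returns the index where it stops.
def scanA (data : List Int) (i : Nat) : Nat :=
  if _h : i + 1 < data.length then
    if data.getD (i + 1) 0 = 0 then scanA data (i + 1) else i + 1
  else data.length
termination_by data.length - i

def find_spikes (data : List Int) (pos_max : Int) (neg_max : Int) : List (List Int) :=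
  (List.range data.length).foldl
    (fun error_segs i =>
      if data.getD i 0 > pos_max ∨ data.getD i 0 < neg_max then
        error_segs ++ [[(i : Int), (scanA data i : Int)]]
      else error_segs) []

-- ===== PORT B =====
-- Backward pass of Source B: processing the list right-to-left, returns (nxt, nz)
-- where nxt[j] is the first absolute index > k+j holding a nonzero value (or
-- the list's length) and nz is that value for position k-1.
def buildNxt : List Int → Nat → List Nat × Nat
  | [], k => ([], k)
  | x :: rest, k =>
    let p := buildNxt rest (k + 1)
    (p.2 :: p.1, if x ≠ 0 then k else p.2)

def find_spikes_alt (data : List Int) (pos_max : Int) (neg_max : Int) : List (List Int) :=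
  let nxt := (buildNxt data 0).1
  (List.range data.length).filterMap
    (fun i =>
      if data.getD i 0 > pos_max ∨ data.getD i 0 < neg_max then
        some [(i : Int), (nxt.getD i 0 : Int)]
      else none)

-- ===== PRECONDITION & SPEC =====
def Spec_find_spikes (data : List Int) (pos_max : Int) (neg_max : Int) (out : List (List Int)) : Prop := out = find_spikes_alt data pos_max neg_max
instance (data : List Int) (pos_max : Int) (neg_max : Int) (out : List (List Int)) : Decidable (Spec_find_spikes data pos_max neg_max out) := by unfold Spec_find_spikes; infer_instance

-- ===== CLAIM (what is proved, stated in full; the proofs are below) =====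
def Claim_equal_find_spikes : Prop := ∀ (data : List Int) (pos_max : Int) (neg_max : Int), Dom_find_spikes data pos_max neg_max → Spec_find_spikes data pos_max neg_max (find_spikes data pos_max neg_max)

-- ===== LEMMAS AND PROOFS =====

-- index of the first nonzero element, or the length if none
def firstNZ : List Int → Nat
  | [] => 0
  | x :: r => if x = 0 then firstNZ r + 1 else 0

theorem buildNxt_snd (l : List Int) (k : Nat) : (buildNxt l k).2 = k + firstNZ l := by
  induction l generalizing k with
  | nil => simp [buildNxt, firstNZ]
  | cons x r ih =>
    simp only [buildNxt, firstNZ]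
    by_cases hx : x = 0
    · simp [hx, ih (k + 1)]; omega
    · simp [hx]

theorem buildNxt_get (l : List Int) (k j : Nat) (hj : j < l.length) :
    (buildNxt l k).1.getD j 0 = k + j + 1 + firstNZ (l.drop (j + 1)) := by
  induction l generalizing k j with
  | nil => simp at hj
  | cons x r ih =>
    cases j with
    | zero =>
      simp only [buildNxt, List.getD_cons_zero, buildNxt_snd r (k + 1), List.drop_succ_cons,
        List.drop_zero]
    | succ j =>
      have hj' : j < r.length := by simpa using hj
      simp only [buildNxt, List.getD_cons_succ]
      rw [ih (k + 1) j hj']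
      simp [List.drop]
      omega

theorem scanA_eq (data : List Int) (i : Nat) (hi : i < data.length) :
    scanA data i = i + 1 + firstNZ (data.drop (i + 1)) := by
  rw [scanA]
  by_cases h : i + 1 < data.length
  · have hd : data.drop (i + 1) = data.getD (i + 1) 0 :: data.drop (i + 2) := by
      rw [List.getD_eq_getElem data 0 h]
      rw [List.drop_eq_getElem_cons h]
    rw [hd]
    simp only [firstNZ]
    by_cases hz : data.getD (i + 1) 0 = 0
    · rw [dif_pos h, if_pos hz, if_pos hz, scanA_eq data (i + 1) h]
      simp only [show i + 1 + 1 = i + 2 from rfl]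
      omega
    · rw [dif_pos h, if_neg hz, if_neg hz]
  · rw [dif_neg h]
    have hlen : i + 1 = data.length := by omega
    rw [List.drop_eq_nil_of_le (by omega)]
    simp only [firstNZ]
    omega
termination_by data.length - i

theorem foldl_append_if' {α β : Type} (p : α → Prop) [DecidablePred p] (f : α → β)
    (l : List α) (acc : List β) :
    l.foldl (fun a x => if p x then a ++ [f x] else a) acc
      = acc ++ (l.filter (fun x => decide (p x))).map f := by
  induction l generalizing acc with
  | nil => simp
  | cons x r ih =>
    by_cases hx : p x <;> simp [hx, ih]

theorem filterMap_if {α β : Type} (p : α → Prop) [DecidablePred p] (g : α → β) (l : List α) :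
    l.filterMap (fun x => if p x then some (g x) else none)
      = (l.filter (fun x => decide (p x))).map g := by
  induction l with
  | nil => rfl
  | cons x r ih =>
    by_cases hx : p x <;> simp [hx, ih]

-- ===== VERDICT (by name: the statement is the Claim_ definition above) =====
theorem find_spikes_spec : Claim_equal_find_spikes := by
  intro data pos_max neg_max _
  unfold Spec_find_spikes find_spikes find_spikes_alt
  rw [foldl_append_if'
        (fun i => data.getD i 0 > pos_max ∨ data.getD i 0 < neg_max)
        (fun i => [(i : Int), (scanA data i : Int)])]
  rw [filterMap_if
        (fun i => data.getD i 0 > pos_max ∨ data.getD i 0 < neg_max)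
        (fun i => [(i : Int), (((buildNxt data 0).1.getD i 0 : Nat) : Int)])]
  simp only [List.nil_append]
  apply List.map_congr_left
  intro i hi
  have hilt : i < data.length := by
    have := List.mem_filter.mp hi
    exact List.mem_range.mp this.1
  have : (buildNxt data 0).1.getD i 0 = scanA data i := by
    rw [buildNxt_get data 0 i hilt, scanA_eq data i hilt]
    omega
  rw [this]
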